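-- pv_equiv track=rewrite | github.com/Jdwalli/Howard-University-CS-Coursework | CSCI 135/Lab One/Almost_Anagram.py | almost_anagram
-- ===== SOURCE A (Python) =====
-- def almost_anagram(str1, str2, k):
--     # Get a dict of all letter freqs for both list
--     str1_freq = {i : 0 for i in str1}
--     str2_freq = {i : 0 for i in str2}
--     bad_letters = []
--
--     for char in str1:
--         str1_freq[char] += 1
--
--     for char in str2:
--         str2_freq[char] += 1
--
--     if len(str1) > len(str2):
--         for letter in str1:
--             # test to see if the letter count in string2 is not greater
--
--             if letter not in str2_freq.keys():
--                 bad_letters.append(letter)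
--             else:
--                 if str2_freq[letter] > str1_freq[letter]:
--                     return False
--         return k >= len(bad_letters)
--     else:
--         for letter in str2:
--             if letter not in str1_freq.keys():
--                 bad_letters.append(letter)
--             else:
--                 if str1_freq[letter] > str2_freq[letter]:
--                     return False
--         return k >= len(bad_letters)
-- ===== SOURCE B (Python) =====
-- def almost_anagram(str1, str2, k):
--     # Sort both strings (A's tie rule: equal lengths -> str2 is the "big" side)
--     # and compare them by a single two-pointer merge over runs of equal chars:
--     # a run of the big string missing from the small one adds its length to the
--     # bad count; a shared char whose run is longer in the small string -> False.
--     if len(str1) > len(str2):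
--         big, small = sorted(str1), sorted(str2)
--     else:
--         big, small = sorted(str2), sorted(str1)
--     bad = 0
--     i = j = 0
--     while i < len(big):
--         c = big[i]
--         run = 0
--         while i < len(big) and big[i] == c:
--             i += 1
--             run += 1
--         while j < len(small) and small[j] < c:
--             j += 1
--         srun = 0
--         while j < len(small) and small[j] == c:
--             j += 1
--             srun += 1
--         if srun:
--             if srun > run:
--                 return False
--         else:
--             bad += run
--     return k >= bad
-- ===== Notes on version B (the rewrite author's own statement) =====
-- stated objective: alternative
-- what changed: Replaces A's hash-map frequency dictionaries and per-position scan of the longer string by sorting both strings and a single two-pointer merge over runs of equal characters: a run of the big string absent from the small one adds its length to the bad count, a shared character with a longer run in the small string returns False.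
import Mathlib
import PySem

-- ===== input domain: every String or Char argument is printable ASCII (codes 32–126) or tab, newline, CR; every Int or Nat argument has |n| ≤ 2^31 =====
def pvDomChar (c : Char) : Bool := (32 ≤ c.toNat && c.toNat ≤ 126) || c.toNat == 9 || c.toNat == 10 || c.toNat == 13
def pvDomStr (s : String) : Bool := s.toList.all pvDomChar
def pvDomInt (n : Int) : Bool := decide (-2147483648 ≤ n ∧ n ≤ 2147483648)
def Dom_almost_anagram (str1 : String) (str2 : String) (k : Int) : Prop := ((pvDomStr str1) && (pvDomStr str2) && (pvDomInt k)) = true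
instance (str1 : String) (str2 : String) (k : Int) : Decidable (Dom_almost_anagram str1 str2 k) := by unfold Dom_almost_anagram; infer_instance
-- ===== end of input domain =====

-- ===== PORT A =====
-- B replaces A's frequency dictionaries and per-position scan by sorting both
-- strings and a two-pointer merge over runs of equal characters (objective:
-- alternative algorithm; return values proved equal on all of Dom).

-- A's scan over the big string: 'of' is the other (small) string's freq dict,
-- 'sf' the scanned (big) string's freq dict, 'bad' the bad_letters list.
def aLoop (of sf : PySem.Dict Char Int) (k : Int) (bad : List Char) : List Char → Bool
  | [] => decide (k ≥ (bad.length : Int))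
  | c :: rest =>
    if !of.contains c then aLoop of sf k (bad ++ [c]) rest
    else if of.getD c 0 > sf.getD c 0 then false
    else aLoop of sf k bad rest

def almost_anagram (str1 : String) (str2 : String) (k : Int) : Bool :=
  let s1 := str1.toList
  let s2 := str2.toList
  -- {i : 0 for i in str}
  let str1_freq0 := s1.foldl (fun d c => d.insert c (0 : Int)) PySem.Dict.empty
  let str2_freq0 := s2.foldl (fun d c => d.insert c (0 : Int)) PySem.Dict.empty
  -- for char in str: freq[char] += 1   (the key is always present; modify is exact there)
  let str1_freq := s1.foldl (fun d c => d.modify c 0 (· + 1)) str1_freq0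
  let str2_freq := s2.foldl (fun d c => d.modify c 0 (· + 1)) str2_freq0
  if PySem.Str.len str1 > PySem.Str.len str2 then
    aLoop str2_freq str1_freq k [] s1
  else
    aLoop str1_freq str2_freq k [] s2

-- ===== PORT B =====
-- the outer while loop: one step consumes the whole run of big's head char
-- (inner whiles = takeWhile/dropWhile), advances the small pointer past
-- smaller chars, and measures the matching run in small.
def bWalk (k : Int) : List Char → List Char → Int → Bool
  | [], _, bad => decide (k ≥ bad)
  | c :: t, small, bad =>
    let run : Int := 1 + ((t.takeWhile (· == c)).length : Int)
    let restB := t.dropWhile (· == c)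
    let small' := small.dropWhile (· < c)
    let srun : Int := ((small'.takeWhile (· == c)).length : Int)
    let restS := small'.dropWhile (· == c)
    if srun ≠ 0 then
      if srun > run then false else bWalk k restB restS bad
    else bWalk k restB small' (bad + run)
  termination_by big => big.length
  decreasing_by
    all_goals exact Nat.lt_succ_of_le (List.length_dropWhile_le _ _)

def almost_anagram_alt (str1 : String) (str2 : String) (k : Int) : Bool :=
  let bs := if PySem.Str.len str1 > PySem.Str.len str2
            then (PySem.List.sorted str1.toList (fun x => x) false,
                  PySem.List.sorted str2.toList (fun x => x) false)
            else (PySem.List.sorted str2.toList (fun x => x) false,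
                  PySem.List.sorted str1.toList (fun x => x) false)
  bWalk k bs.1 bs.2 0

-- ===== PRECONDITION & SPEC =====
def Spec_almost_anagram (str1 : String) (str2 : String) (k : Int) (out : Bool) : Prop := out = almost_anagram_alt str1 str2 k
instance (str1 : String) (str2 : String) (k : Int) (out : Bool) : Decidable (Spec_almost_anagram str1 str2 k out) := by unfold Spec_almost_anagram; infer_instance

-- ===== CLAIM (what is proved, stated in full; the proofs are below) =====
def Claim_equal_almost_anagram : Prop := ∀ (str1 : String) (str2 : String) (k : Int), Dom_almost_anagram str1 str2 k → Spec_almost_anagram str1 str2 k (almost_anagram str1 str2 k)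

-- ===== LEMMAS AND PROOFS =====

-- common closed form of both programs on a (big, small) pair of char lists
def phi (k : Int) (big small : List Char) : Bool :=
  if big.any (fun c => small.contains c && decide ((small.count c : Int) > (big.count c : Int)))
  then false
  else decide (k ≥ (big.countP (fun c => !small.contains c) : Int))

-- the zero-initialised comprehension dict looks up to 0 everywhere
lemma zeros_getD (s : List Char) (d : PySem.Dict Char Int) (c : Char)
    (h : d.getD c 0 = 0) :
    (s.foldl (fun d c => d.insert c (0 : Int)) d).getD c 0 = 0 := by
  induction s generalizing d with
  | nil => simpa using h
  | cons x xs ih =>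
    simp only [List.foldl_cons]
    exact ih _ (by rw [PySem.Dict.getD_insert]; split <;> simp [h])

-- A's freq dict agrees with List.count on every lookup
lemma freqA_getD (s : List Char) (c : Char) :
    ((s.foldl (fun d c => d.modify c 0 (· + 1))
      (s.foldl (fun d c => d.insert c (0 : Int)) PySem.Dict.empty)).getD c 0)
    = (s.count c : Int) := by
  rw [PySem.Dict.getD_foldl_modify_add_one,
      zeros_getD s PySem.Dict.empty c (by simp [PySem.Dict.getD_empty])]
  ring

-- A's freq dict has exactly the string's characters as keys
lemma freqA_contains (s : List Char) (c : Char) :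
    ((s.foldl (fun d c => d.modify c 0 (· + 1))
      (s.foldl (fun d c => d.insert c (0 : Int)) PySem.Dict.empty)).contains c)
    = s.contains c := by
  rw [PySem.Dict.contains_eq_decide_mem_keys, PySem.Dict.keys_foldl_modify,
      PySem.Dict.keys_foldl_insert]
  simp [PySem.Dict.keys_empty, PySem.Set.mem_update]

-- closed form of A's scan
lemma aLoop_spec (of sf : PySem.Dict Char Int) (k : Int) :
    ∀ (l bad : List Char),
    aLoop of sf k bad l =
      if l.any (fun c => of.contains c && decide (of.getD c 0 > sf.getD c 0)) then false
      else decide (k ≥ (bad.length : Int) + (l.countP (fun c => !of.contains c) : Int)) := by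
  intro l
  induction l with
  | nil => intro bad; simp [aLoop]
  | cons c rest ih =>
    intro bad
    by_cases h : of.contains c = true
    · by_cases hg : of.getD c 0 > sf.getD c 0
      · simp [aLoop, h, hg]
      · simp only [aLoop, h, hg, Bool.not_true, List.any_cons, List.countP_cons, if_false]
        rw [ih bad]
        simp
    · simp only [Bool.not_eq_true] at h
      simp only [aLoop, h, Bool.not_false, if_true, List.any_cons, List.countP_cons,
                 Bool.false_and, Bool.false_or]
      rw [ih (bad ++ [c])]
      split
      · rfl
      · rw [decide_eq_decide]
        simp only [List.length_append, List.length_singleton]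
        push_cast
        constructor <;> intro <;> omega

-- A's branch computes phi of its (big, small) pair
lemma aSide (big small : List Char) (k : Int) :
    aLoop
      (small.foldl (fun d c => d.modify c 0 (· + 1))
        (small.foldl (fun d c => d.insert c (0 : Int)) PySem.Dict.empty))
      (big.foldl (fun d c => d.modify c 0 (· + 1))
        (big.foldl (fun d c => d.insert c (0 : Int)) PySem.Dict.empty))
      k [] big
    = phi k big small := by
  rw [aLoop_spec]
  unfold phi
  simp only [freqA_getD, freqA_contains, List.length_nil, Nat.cast_zero, zero_add]

-- sorted prefix facts: in a sorted list whose elements are all ≥ c, the run of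
-- c's sits at the front, and everything after it is > c
lemma run_facts (c : Char) :
    ∀ (l : List Char), l.Pairwise (· ≤ ·) → (∀ x ∈ l, c ≤ x) →
    (l.takeWhile (· == c)).length = l.count c ∧ ∀ x ∈ l.dropWhile (· == c), c < x := by
  intro l
  induction l with
  | nil => intro _ _; simp
  | cons y t ih =>
    intro hp hge
    rcases List.pairwise_cons.mp hp with ⟨hyt, hpt⟩
    by_cases hy : y = c
    · subst hy
      obtain ⟨h1, h2⟩ := ih hpt hyt
      refine ⟨?_, ?_⟩
      · simp only [List.takeWhile_cons, beq_self_eq_true, if_true, List.length_cons,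
                   List.count_cons_self, h1]
      · simpa [List.dropWhile_cons] using h2
    · have hcy : c < y := lt_of_le_of_ne (hge y (by simp)) (fun h => hy h.symm)
      have hne : (y == c) = false := by simp [hy]
      have hnotc : ∀ x ∈ y :: t, c < x := by
        intro x hx
        rcases List.mem_cons.mp hx with h | h
        · exact h ▸ hcy
        · exact lt_of_lt_of_le hcy (hyt x h)
      refine ⟨?_, ?_⟩
      · simp only [List.takeWhile_cons, hne, Bool.false_eq_true, if_false, List.length_nil]
        symm
        rw [List.count_eq_zero]
        intro hmem
        exact absurd rfl (ne_of_gt (hnotc c hmem))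
      · simpa [List.dropWhile_cons, hne] using hnotc

-- dropping elements that fail a predicate x never satisfies keeps x's count
lemma count_dropWhile_of_not (p : Char → Bool) (l : List Char) (x : Char)
    (hx : p x = false) : (l.dropWhile p).count x = l.count x := by
  conv_rhs => rw [← List.takeWhile_append_dropWhile (p := p) (l := l)]
  rw [List.count_append]
  have : (l.takeWhile p).count x = 0 := by
    rw [List.count_eq_zero]
    intro hmem
    exact absurd (List.mem_takeWhile_imp hmem) (by simp [hx])
  omega

-- elements surviving dropWhile (· < c) in a sorted list are ≥ c
lemma dropWhile_lt_ge (c : Char) :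
    ∀ (l : List Char), l.Pairwise (· ≤ ·) → ∀ x ∈ l.dropWhile (· < c), c ≤ x := by
  intro l
  induction l with
  | nil => simp
  | cons y t ih =>
    intro hp x hx
    rcases List.pairwise_cons.mp hp with ⟨hyt, hpt⟩
    by_cases hy : y < c
    · rw [List.dropWhile_cons_of_pos (by simpa using hy)] at hx
      exact ih hpt x hx
    · rw [List.dropWhile_cons_of_neg (by simpa using hy)] at hx
      rcases List.mem_cons.mp hx with h | h
      · exact h ▸ le_of_not_gt hy
      · exact le_trans (le_of_not_gt hy) (hyt x h)

-- closed form of B's merge walk on sorted inputs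
lemma bWalk_spec (k : Int) :
    ∀ n (big small : List Char) (bad : Int), big.length ≤ n →
    big.Pairwise (· ≤ ·) → small.Pairwise (· ≤ ·) →
    bWalk k big small bad =
      if big.any (fun c => small.contains c && decide ((small.count c : Int) > (big.count c : Int)))
      then false
      else decide (k ≥ bad + (big.countP (fun c => !small.contains c) : Int)) := by
  intro n
  induction n with
  | zero =>
    intro big small bad hlen _ _
    have : big = [] := List.length_eq_zero_iff.mp (Nat.le_zero.mp hlen)
    subst this
    simp [bWalk]
  | succ m ih =>
    intro big small bad hlen hbig hsmall
    match big with
    | [] => simp [bWalk]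
    | c :: t =>
      rcases List.pairwise_cons.mp hbig with ⟨hct, hpt⟩
      have hgeBig : ∀ x ∈ c :: t, c ≤ x := by
        intro x hx; rcases List.mem_cons.mp hx with h | h
        · exact le_of_eq h.symm
        · exact hct x h
      obtain ⟨hrunB, hrestB⟩ := run_facts c (c :: t) hbig hgeBig
      -- small side
      set small' := small.dropWhile (· < c) with hsmall'def
      have hsmall'sorted : small'.Pairwise (· ≤ ·) :=
        hsmall.sublist (List.dropWhile_sublist _)
      have hgeS : ∀ x ∈ small', c ≤ x := dropWhile_lt_ge c small hsmall
      obtain ⟨hrunS, hrestS⟩ := run_facts c small' hsmall'sorted hgeS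
      -- counts in small' vs small for chars ≥ c
      have hcountS' : ∀ x, c ≤ x → small'.count x = small.count x := by
        intro x hx
        exact count_dropWhile_of_not _ _ _ (by simp [not_lt.mpr hx])
      -- counts in restS vs small for chars > c
      have hcountRS : ∀ x, c < x → (small'.dropWhile (· == c)).count x = small.count x := by
        intro x hx
        rw [count_dropWhile_of_not _ _ _ (by simp [ne_of_gt hx]), hcountS' x (le_of_lt hx)]
      -- counts in restB vs big for chars ≠ c
      have hcountRB : ∀ x, x ≠ c → ((c :: t).dropWhile (· == c)).count x = (c :: t).count x := by
        intro x hx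
        exact count_dropWhile_of_not _ _ _ (by simp [hx])
      -- membership in restB: exactly the members of big other than c
      have hmemRB : ∀ x, x ∈ (c :: t).dropWhile (· == c) ↔ x ∈ c :: t ∧ x ≠ c := by
        intro x
        constructor
        · intro hx
          exact ⟨(List.dropWhile_sublist _).mem hx, ne_of_gt (hrestB x hx)⟩
        · intro ⟨hx, hne⟩
          have : (c :: t).count x ≠ 0 := by
            simp [List.count_eq_zero, hx]
          rw [← hcountRB x hne] at this
          exact List.count_pos_iff.mp (Nat.pos_of_ne_zero this)
      have hrestBsorted : ((c :: t).dropWhile (· == c)).Pairwise (· ≤ ·) :=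
        hbig.sublist (List.dropWhile_sublist _)
      have hrestSsorted : (small'.dropWhile (· == c)).Pairwise (· ≤ ·) :=
        hsmall'sorted.sublist (List.dropWhile_sublist _)
      have hlenRB : ((c :: t).dropWhile (· == c)).length ≤ m := by
        have h1 : ((c :: t).dropWhile (· == c)).length = (t.dropWhile (· == c)).length := by
          simp [List.dropWhile_cons]
        have := List.length_dropWhile_le (· == c) t
        simp only [List.length_cons] at hlen
        omega
      -- contains in small, as count positivity
      have hcontS : ∀ (l : List Char) x, l.contains x = decide (0 < l.count x) := by
        intro l x
        simp [List.count_pos_iff]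
      have hRBeq : (c :: t).dropWhile (· == c) = t.dropWhile (· == c) := by
        simp [List.dropWhile_cons]
      have hTWeq : (c :: t).takeWhile (· == c) = c :: t.takeWhile (· == c) := by
        simp [List.takeWhile_cons]
      have hrun : 1 + (t.takeWhile (· == c)).length = (c :: t).count c := by
        rw [← hrunB, hTWeq]; simp [Nat.add_comm]
      have hsrun : (small'.takeWhile (· == c)).length = small.count c := by
        rw [hrunS, hcountS' c le_rfl]
      rw [bWalk]
      simp only [hRBeq.symm, ← hsmall'def]
      -- predicate equality on the remainder of big, for a small-side list s2
      -- whose counts agree with small on every char > c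
      have hpred : ∀ (s2 : List Char), (∀ x, c < x → s2.count x = small.count x) →
          ∀ x ∈ (c :: t).dropWhile (· == c),
          (s2.contains x && decide ((s2.count x : Int) >
            (((c :: t).dropWhile (· == c)).count x : Int)))
          = (small.contains x && decide ((small.count x : Int) > ((c :: t).count x : Int))) := by
        intro s2 hs2 x hx
        have hxgt : c < x := hrestB x hx
        rw [hcontS s2, hcontS small, hs2 x hxgt, hcountRB x (ne_of_gt hxgt)]
      -- the any-condition over big, given the head char c is not an early-False
      have hany : ∀ (s2 : List Char), (∀ x, c < x → s2.count x = small.count x) →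
          (small.contains c && decide ((small.count c : Int) > ((c :: t).count c : Int))) = false →
          (((c :: t).dropWhile (· == c)).any (fun x => s2.contains x &&
            decide ((s2.count x : Int) > (((c :: t).dropWhile (· == c)).count x : Int))))
          = ((c :: t).any (fun x => small.contains x &&
            decide ((small.count x : Int) > ((c :: t).count x : Int)))) := by
        intro s2 hs2 hc0
        rw [Bool.eq_iff_iff]
        simp only [List.any_eq_true]
        constructor
        · rintro ⟨x, hx, hp⟩
          rw [hpred s2 hs2 x hx] at hp
          exact ⟨x, ((hmemRB x).mp hx).1, hp⟩
        · rintro ⟨x, hx, hp⟩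
          by_cases hxc : x = c
          · subst hxc
            rw [hc0] at hp
            exact absurd hp (by simp)
          · have hx' : x ∈ (c :: t).dropWhile (· == c) := (hmemRB x).mpr ⟨hx, hxc⟩
            refine ⟨x, hx', ?_⟩
            rw [hpred s2 hs2 x hx']
            exact hp
      -- the bad-position count over big splits at the head run
      have hcountP : ∀ (s2 : List Char), (∀ x, c < x → s2.count x = small.count x) →
          ((c :: t).dropWhile (· == c)).countP (fun x => !s2.contains x)
          = (c :: t).countP (fun x => !small.contains x)
            - (if small.contains c then 0 else ((c :: t).takeWhile (· == c)).length) := by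
        intro s2 hs2
        have hsplit : (c :: t).countP (fun x => !small.contains x)
            = ((c :: t).takeWhile (· == c)).countP (fun x => !small.contains x)
              + ((c :: t).dropWhile (· == c)).countP (fun x => !small.contains x) := by
          conv_lhs => rw [← List.takeWhile_append_dropWhile (p := (· == c)) (l := c :: t)]
          rw [List.countP_append]
        have htw : ∀ x ∈ (c :: t).takeWhile (· == c), x = c := by
          intro x hx
          have hb := List.mem_takeWhile_imp hx
          exact eq_of_beq hb
        have hdw : ((c :: t).dropWhile (· == c)).countP (fun x => !s2.contains x)
            = ((c :: t).dropWhile (· == c)).countP (fun x => !small.contains x) := by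
          apply List.countP_congr
          intro x hx
          have hxgt : c < x := hrestB x hx
          rw [hcontS s2, hcontS small, hs2 x hxgt]
        by_cases hcc : small.contains c = true
        · have h2 : ((c :: t).takeWhile (· == c)).countP (fun x => !small.contains x) = 0 := by
            rw [List.countP_eq_zero]
            intro x hx
            have hmem : c ∈ small := by simpa using hcc
            rw [htw x hx]
            simp [hmem]
          rw [hdw, hsplit, h2, if_pos hcc]
          omega
        · have h2 : ((c :: t).takeWhile (· == c)).countP (fun x => !small.contains x)
              = ((c :: t).takeWhile (· == c)).length := by
            rw [List.countP_eq_length]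
            intro x hx
            have hmem : c ∉ small := by simpa using hcc
            rw [htw x hx]
            simp [hmem]
          rw [hdw, hsplit, h2, if_neg hcc]
          omega
      by_cases h0 : ((small'.takeWhile (· == c)).length : Int) ≠ 0
      · rw [if_pos h0]
        -- head char occurs in small
        have hposc : 0 < small.count c := by
          rcases Nat.eq_zero_or_pos (small.count c) with h | h
          · exact absurd (by rw [hsrun, h]; rfl) h0
          · exact h
        have hmemc : small.contains c = true := by
          rw [hcontS]; exact decide_eq_true hposc
        by_cases hgt : ((small'.takeWhile (· == c)).length : Int) >
            1 + ((t.takeWhile (· == c)).length : Int)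
        · -- early False: run of c in small longer than in big
          rw [if_pos hgt]
          have hcond : ((c :: t).any (fun x => small.contains x &&
              decide ((small.count x : Int) > ((c :: t).count x : Int)))) = true := by
            rw [List.any_eq_true]
            refine ⟨c, by simp, ?_⟩
            rw [hmemc, Bool.true_and]
            apply decide_eq_true
            rw [← hsrun, ← hrun]
            push_cast at hgt ⊢
            omega
          rw [hcond]
          simp
        · rw [if_neg hgt]
          rw [ih _ _ bad hlenRB (hRBeq ▸ hrestBsorted) hrestSsorted]
          have hc0 : (small.contains c &&
              decide ((small.count c : Int) > ((c :: t).count c : Int))) = false := by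
            rw [hmemc, Bool.true_and]
            apply decide_eq_false
            rw [← hsrun, ← hrun]
            push_cast at hgt ⊢
            omega
          rw [hany _ (fun x hx => hcountRS x hx) hc0]
          split
          · rfl
          · rw [hcountP (small'.dropWhile (· == c)) (fun x hx => hcountRS x hx), hmemc]
            simp
      · rw [if_neg h0]
        -- head char absent from small
        have hzero : small.count c = 0 := by
          simp only [ne_eq, not_not, Nat.cast_eq_zero] at h0
          rw [← hsrun]
          exact h0
        have hmemc : small.contains c = false := by
          rw [hcontS, hzero]
          simp
        rw [ih _ _ (bad + (1 + ((t.takeWhile (· == c)).length : Int))) hlenRB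
              (hRBeq ▸ hrestBsorted) hsmall'sorted]
        have hc0 : (small.contains c &&
            decide ((small.count c : Int) > ((c :: t).count c : Int))) = false := by
          rw [hmemc, Bool.false_and]
        rw [hany small' (fun x hx => hcountS' x (le_of_lt hx)) hc0]
        split
        · rfl
        · rw [decide_eq_decide]
          rw [hcountP small' (fun x hx => hcountS' x (le_of_lt hx)), hmemc]
          have hle : ((c :: t).takeWhile (· == c)).length ≤
              (c :: t).countP (fun x => !small.contains x) := by
            have h1 : ((c :: t).takeWhile (· == c)).countP (fun x => !small.contains x)
                = ((c :: t).takeWhile (· == c)).length := by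
              rw [List.countP_eq_length]
              intro x hx
              have hb := List.mem_takeWhile_imp hx
              have hnm : c ∉ small := by simpa using hmemc
              rw [eq_of_beq hb]
              simp [hnm]
            calc ((c :: t).takeWhile (· == c)).length
                = ((c :: t).takeWhile (· == c)).countP (fun x => !small.contains x) := h1.symm
              _ ≤ (c :: t).countP (fun x => !small.contains x) := by
                  conv_rhs => rw [← List.takeWhile_append_dropWhile (p := (· == c)) (l := c :: t)]
                  rw [List.countP_append]
                  omega
          have hTW : ((c :: t).takeWhile (· == c)).length
              = 1 + (t.takeWhile (· == c)).length := by
            rw [hTWeq]; simp; omega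
          simp only [Bool.false_eq_true, if_false]
          push_cast
          omega

-- phi only depends on the multisets of its two lists
lemma phi_perm (k : Int) (b b' s s' : List Char) (hb : b'.Perm b) (hs : s'.Perm s) :
    phi k b' s' = phi k b s := by
  unfold phi
  have hcount_s : ∀ x, s'.count x = s.count x := fun x => hs.count_eq x
  have hcount_b : ∀ x, b'.count x = b.count x := fun x => hb.count_eq x
  have hcontains : ∀ x, s'.contains x = s.contains x := by
    intro x
    simp [hs.mem_iff]
  have hany : (b'.any (fun c => s'.contains c && decide ((s'.count c : Int) > (b'.count c : Int))))
      = (b.any (fun c => s.contains c && decide ((s.count c : Int) > (b.count c : Int)))) := by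
    rw [Bool.eq_iff_iff]
    simp only [List.any_eq_true]
    constructor
    · rintro ⟨c, hc, hp⟩
      exact ⟨c, hb.mem_iff.mp hc, by rwa [hcontains, hcount_s, hcount_b] at hp⟩
    · rintro ⟨c, hc, hp⟩
      exact ⟨c, hb.mem_iff.mpr hc, by rwa [hcontains, hcount_s, hcount_b]⟩
  rw [hany]
  split
  · rfl
  · have hc : b'.countP (fun c => !s'.contains c) = b.countP (fun c => !s.contains c) :=
      calc b'.countP (fun c => !s'.contains c)
          = b'.countP (fun c => !s.contains c) := List.countP_congr (fun x _ => by rw [hcontains])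
        _ = b.countP (fun c => !s.contains c) := hb.countP_eq _
    rw [hc]

-- B's branch computes phi of its (big, small) pair
lemma bSide (big small : List Char) (k : Int) :
    bWalk k (PySem.List.sorted big (fun x => x) false)
            (PySem.List.sorted small (fun x => x) false) 0
    = phi k big small := by
  rw [bWalk_spec k (PySem.List.sorted big (fun x => x) false).length _ _ _ le_rfl
        (PySem.List.sorted_pairwise big (fun x => x))
        (PySem.List.sorted_pairwise small (fun x => x))]
  have := phi_perm k big (PySem.List.sorted big (fun x => x) false)
                     small (PySem.List.sorted small (fun x => x) false)
                     (PySem.List.sorted_perm big (fun x => x) false)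
                     (PySem.List.sorted_perm small (fun x => x) false)
  unfold phi at this
  simp only [zero_add]
  rw [this]
  rfl

-- ===== VERDICT (by name: the statement is the Claim_ definition above) =====
theorem almost_anagram_spec : Claim_equal_almost_anagram := by
  intro str1 str2 k _
  unfold Spec_almost_anagram almost_anagram almost_anagram_alt
  by_cases h : PySem.Str.len str1 > PySem.Str.len str2
  · simp only [h, if_true]
    rw [aSide str1.toList str2.toList k, ← bSide str1.toList str2.toList k]
  · simp only [h, if_false]
    rw [aSide str2.toList str1.toList k, ← bSide str2.toList str1.toList k]
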